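-- pv_equiv track=rewrite | github.com/evyooo/Algorithm-Study | Programmers/42840. 모의고사/yoojin.py | solution
-- ===== SOURCE A (Python) =====
-- def solution(li):
--     # 학생1, 2, 3의 점수
--     score = [0, 0, 0]
--
--     # 최소공배수인 40에 맞춰서 규칙 길이 늘이기
--     st1 = [1, 2, 3, 4, 5] * 8
--     st2 = [2, 1, 2, 3, 2, 4, 2, 5] * 5
--     st3 = [3, 3, 1, 1, 2, 2, 4, 4, 5, 5] * 4
--
--
--     # brute force 40개씩 끊어서
--     for i in range(len(li)):
--         rem = i % 40
--         if (st1[rem] == li[i]):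
--             score[0] += 1
--         if (st2[rem] == li[i]):
--             score[1] += 1
--         if (st3[rem] == li[i]):
--             score[2] += 1
--
--
--     answer = []
--     maxnum = max(score)
--
--     for i in range(3):
--         if score[i] == maxnum:
--             if i == 0:
--                 answer.append(1)
--             elif i == 1:
--                 answer.append(2)
--             else:
--                 answer.append(3)
--
--     return answer
-- ===== SOURCE B (Python) =====
-- def _score(pattern, li):
--     # Walk li one pattern-sized chunk at a time: compare each chunk to the
--     # pattern with zip (which truncates the final partial chunk automatically).
--     L = len(pattern)
--     total = 0
--     j = 0
--     while j < len(li):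
--         total += sum(a == b for a, b in zip(li[j:j+L], pattern))
--         j += L
--     return total
--
--
-- def solution(li):
--     patterns = [[1, 2, 3, 4, 5],
--                 [2, 1, 2, 3, 2, 4, 2, 5],
--                 [3, 3, 1, 1, 2, 2, 4, 4, 5, 5]]
--     scores = [_score(p, li) for p in patterns]
--     m = max(scores)
--     return [i + 1 for i, sc in enumerate(scores) if sc == m]
-- ===== Notes on version B (the rewrite author's own statement) =====
-- stated objective: alternative
-- what changed: B removes all index arithmetic: instead of A's single fused loop over indices with i % 40 against three pre-tiled length-40 sheets, B scores each pattern by repeatedly zip-comparing the head chunk of the answer list against the pattern at its native length and slicing the chunk off, then picks the max via enumerate; correctness rests on 40 being a common multiple of 5, 8 and 10.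
import Mathlib
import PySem

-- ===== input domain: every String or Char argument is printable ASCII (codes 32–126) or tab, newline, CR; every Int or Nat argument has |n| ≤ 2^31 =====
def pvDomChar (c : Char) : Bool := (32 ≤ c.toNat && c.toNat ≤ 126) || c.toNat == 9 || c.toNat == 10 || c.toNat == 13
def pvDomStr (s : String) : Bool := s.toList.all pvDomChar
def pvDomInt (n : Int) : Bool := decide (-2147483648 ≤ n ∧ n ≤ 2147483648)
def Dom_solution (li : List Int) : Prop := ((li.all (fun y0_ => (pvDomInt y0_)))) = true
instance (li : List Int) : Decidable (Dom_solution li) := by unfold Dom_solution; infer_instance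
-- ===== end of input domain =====

-- B replaces A's fused index loop over lcm-40-extended answer sheets (i % 40 with three
-- branch counters) by chunked zip-comparison: each pattern's score is obtained by repeatedly
-- zipping the head chunk of the list against the pattern at its native length and slicing
-- the chunk off; no index arithmetic remains (objective: alternative).

-- ===== PORT A =====
def solution (li : List Int) : List Int :=
  -- st1/st2/st3: the patterns repeated to length 40 ('[...] * 8' etc.)
  let st1 : List Int := (List.replicate 8 ([1,2,3,4,5] : List Int)).flatten
  let st2 : List Int := (List.replicate 5 ([2,1,2,3,2,4,2,5] : List Int)).flatten
  let st3 : List Int := (List.replicate 4 ([3,3,1,1,2,2,4,4,5,5] : List Int)).flatten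
  -- for i in range(len(li)): three independent 'if' updates of score[0..2]
  let score := (PySem.List.pyRange 0 (PySem.List.len li) 1).foldl
    (fun (s : Int × Int × Int) i =>
      let rem := PySem.Int.mod i 40
      ((if PySem.List.pyGetD st1 rem 0 == PySem.List.pyGetD li i 0 then s.1 + 1 else s.1),
       (if PySem.List.pyGetD st2 rem 0 == PySem.List.pyGetD li i 0 then s.2.1 + 1 else s.2.1),
       (if PySem.List.pyGetD st3 rem 0 == PySem.List.pyGetD li i 0 then s.2.2 + 1 else s.2.2)))
    (0, 0, 0)
  let maxnum := (PySem.List.max? [score.1, score.2.1, score.2.2] (fun x => x)).getD 0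
  -- for i in range(3): append i+1 when score[i] == maxnum (the if/elif chain of A)
  (PySem.List.pyRange 0 3 1).foldl
    (fun ans i =>
      if PySem.List.pyGetD [score.1, score.2.1, score.2.2] i 0 == maxnum then
        if i == 0 then ans ++ [1]
        else if i == 1 then ans ++ [2]
        else ans ++ [3]
      else ans) []

-- ===== PORT B =====
-- _score: j walks li in steps of len(pattern); each step zip-compares the chunk
-- li[j:j+L] (PySem.List.slice, exact) against the pattern. j only ever holds the
-- nonnegative multiples of L, so it is carried as a Nat (cast at the slice).
-- The 'p.length = 0' guard only makes the recursion total; _score is never called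
-- on an empty pattern (Python would not terminate there).
def pvScoreLoop (p li : List Int) (j : Nat) : Int :=
  if h : j < li.length then
    if hL : p.length = 0 then 0
    else
      (((PySem.List.slice li (some (j : Int)) (some ((j : Int) + (p.length : Int)))).zip p).map
          (fun ab => if ab.1 == ab.2 then (1 : Int) else 0)).sum
        + pvScoreLoop p li (j + p.length)
  else 0
termination_by li.length - j
decreasing_by omega

def solution_alt (li : List Int) : List Int :=
  let patterns : List (List Int) :=
    [[1,2,3,4,5], [2,1,2,3,2,4,2,5], [3,3,1,1,2,2,4,4,5,5]]
  let scores := patterns.map (fun p => pvScoreLoop p li 0)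
  let m := (PySem.List.max? scores (fun x => x)).getD 0
  ((PySem.List.enumerate scores).filter (fun isc => isc.2 == m)).map (fun isc => isc.1 + 1)

-- ===== PRECONDITION & SPEC =====
def Spec_solution (li : List Int) (out : List Int) : Prop := out = solution_alt li
instance (li : List Int) (out : List Int) : Decidable (Spec_solution li out) := by unfold Spec_solution; infer_instance

-- ===== CLAIM =====
def Claim_equal_solution : Prop := ∀ (li : List Int), Dom_solution li → Spec_solution li (solution li)

-- ===== LEMMAS AND PROOFS =====

-- proof-only recursion: score of li against p, consuming whole chunks structurally
def pvChunkScore (p li : List Int) : Int :=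
  match li with
  | [] => 0
  | x :: xs =>
    if _hL : p.length = 0 then 0
    else
      (((x :: xs).zip p).map (fun ab => if ab.1 == ab.2 then (1 : Int) else 0)).sum
        + pvChunkScore p ((x :: xs).drop p.length)
termination_by li.length
decreasing_by simp only [List.length_drop, List.length_cons]; omega

-- canonical per-pattern count: matches of li[i] against p[i % len p] over all indices
def pvCnt (p li : List Int) : Nat :=
  (List.range li.length).countP (fun i => li.getD i 0 == p.getD (i % p.length) 0)

-- A's fused triple loop yields each predicate's count
theorem pv_triple_fold (l : List Int) (f g h : Int → Bool) (a b c : Int) :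
    l.foldl (fun (s : Int × Int × Int) i =>
        ((if f i then s.1 + 1 else s.1),
         (if g i then s.2.1 + 1 else s.2.1),
         (if h i then s.2.2 + 1 else s.2.2))) (a, b, c)
      = (a + (l.countP f : Int), b + (l.countP g : Int), c + (l.countP h : Int)) := by
  induction l generalizing a b c with
  | nil => simp
  | cons x xs ih =>
    simp only [List.foldl_cons, ih, List.countP_cons]
    by_cases hf : f x <;> by_cases hg : g x <;> by_cases hh : h x <;>
      simp [hf, hg, hh, Prod.ext_iff] <;> omega

-- A's 40-sheet predicate equals the native-length predicate on every index of the range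
theorem pv_pred_congr (li : List Int) (st p : List Int) (hp : p.length ∣ 40)
    (hsheet : ∀ s : Nat, s < 40 → st.getD s 0 = p.getD (s % p.length) 0)
    (i : Int) (hi : i ∈ PySem.List.pyRange 0 (PySem.List.len li) 1) :
    (PySem.List.pyGetD st (PySem.Int.mod i 40) 0 == PySem.List.pyGetD li i 0)
      = (PySem.List.pyGetD li i 0 == PySem.List.pyGetD p (PySem.Int.mod i (PySem.List.len p)) 0) := by
  have h0 : 0 ≤ i := ((PySem.List.mem_pyRange_one).1 hi).1
  obtain ⟨n, rfl⟩ := Int.eq_ofNat_of_zero_le h0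
  have h40 : PySem.Int.mod (n : Int) 40 = ((n % 40 : Nat) : Int) := by
    exact_mod_cast PySem.Int.mod_natCast n 40
  have hlp : PySem.List.len p = ((p.length : Nat) : Int) := by
    simp [PySem.List.len_eq]
  have hmp : PySem.Int.mod (n : Int) (PySem.List.len p) = ((n % p.length : Nat) : Int) := by
    rw [hlp]; exact_mod_cast PySem.Int.mod_natCast n p.length
  rw [h40, hmp, PySem.List.pyGetD_natCast, PySem.List.pyGetD_natCast, PySem.List.pyGetD_natCast]
  have heq : st.getD (n % 40) 0 = p.getD (n % p.length) 0 := by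
    have := hsheet (n % 40) (Nat.mod_lt _ (by norm_num))
    rwa [Nat.mod_mod_of_dvd n hp] at this
  rw [heq]
  exact Bool.beq_comm

-- the countP over pyRange of the native predicate is pvCnt
theorem pv_countP_pyRange_eq_cnt (p li : List Int) :
    (PySem.List.pyRange 0 (PySem.List.len li) 1).countP
      (fun i => PySem.List.pyGetD li i 0 == PySem.List.pyGetD p (PySem.Int.mod i (PySem.List.len p)) 0)
    = pvCnt p li := by
  rw [PySem.List.pyRange_one, List.countP_map, pvCnt]
  have hlen : ((PySem.List.len li - 0).toNat) = li.length := by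
    simp [PySem.List.len_eq]
  rw [hlen]
  refine List.countP_congr (fun k _ => ?_)
  simp only [Function.comp_apply, zero_add]
  have hmp : PySem.Int.mod (k : Int) (PySem.List.len p) = ((k % p.length : Nat) : Int) := by
    rw [show PySem.List.len p = ((p.length : Nat) : Int) by simp [PySem.List.len_eq]]
    exact_mod_cast PySem.Int.mod_natCast k p.length
  rw [hmp, PySem.List.pyGetD_natCast, PySem.List.pyGetD_natCast]

-- the three per-pattern bridges: A's 40-sheet predicate count = pvCnt at native length
theorem pv_cnt1 (li : List Int) :
    (PySem.List.pyRange 0 (PySem.List.len li) 1).countP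
      (fun i => PySem.List.pyGetD ((List.replicate 8 ([1,2,3,4,5] : List Int)).flatten) (PySem.Int.mod i 40) 0 == PySem.List.pyGetD li i 0)
    = pvCnt [1,2,3,4,5] li := by
  rw [List.countP_congr (fun i hi => by
    rw [pv_pred_congr li ((List.replicate 8 ([1,2,3,4,5] : List Int)).flatten) [1,2,3,4,5] (by decide) (by decide) i hi])]
  exact pv_countP_pyRange_eq_cnt _ _

theorem pv_cnt2 (li : List Int) :
    (PySem.List.pyRange 0 (PySem.List.len li) 1).countP
      (fun i => PySem.List.pyGetD ((List.replicate 5 ([2,1,2,3,2,4,2,5] : List Int)).flatten) (PySem.Int.mod i 40) 0 == PySem.List.pyGetD li i 0)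
    = pvCnt [2,1,2,3,2,4,2,5] li := by
  rw [List.countP_congr (fun i hi => by
    rw [pv_pred_congr li ((List.replicate 5 ([2,1,2,3,2,4,2,5] : List Int)).flatten) [2,1,2,3,2,4,2,5] (by decide) (by decide) i hi])]
  exact pv_countP_pyRange_eq_cnt _ _

theorem pv_cnt3 (li : List Int) :
    (PySem.List.pyRange 0 (PySem.List.len li) 1).countP
      (fun i => PySem.List.pyGetD ((List.replicate 4 ([3,3,1,1,2,2,4,4,5,5] : List Int)).flatten) (PySem.Int.mod i 40) 0 == PySem.List.pyGetD li i 0)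
    = pvCnt [3,3,1,1,2,2,4,4,5,5] li := by
  rw [List.countP_congr (fun i hi => by
    rw [pv_pred_congr li ((List.replicate 4 ([3,3,1,1,2,2,4,4,5,5] : List Int)).flatten) [3,3,1,1,2,2,4,4,5,5] (by decide) (by decide) i hi])]
  exact pv_countP_pyRange_eq_cnt _ _

-- A's full score-accumulating fold computes the three pvCnt values
theorem pv_scores_eq (li : List Int) :
    (PySem.List.pyRange 0 (PySem.List.len li) 1).foldl
      (fun (s : Int × Int × Int) i =>
        let rem := PySem.Int.mod i 40
        ((if PySem.List.pyGetD ((List.replicate 8 ([1,2,3,4,5] : List Int)).flatten) rem 0 == PySem.List.pyGetD li i 0 then s.1 + 1 else s.1),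
         (if PySem.List.pyGetD ((List.replicate 5 ([2,1,2,3,2,4,2,5] : List Int)).flatten) rem 0 == PySem.List.pyGetD li i 0 then s.2.1 + 1 else s.2.1),
         (if PySem.List.pyGetD ((List.replicate 4 ([3,3,1,1,2,2,4,4,5,5] : List Int)).flatten) rem 0 == PySem.List.pyGetD li i 0 then s.2.2 + 1 else s.2.2)))
      (0, 0, 0)
    = ((pvCnt [1,2,3,4,5] li : Int), (pvCnt [2,1,2,3,2,4,2,5] li : Int), (pvCnt [3,3,1,1,2,2,4,4,5,5] li : Int)) := by
  rw [pv_triple_fold, pv_cnt1, pv_cnt2, pv_cnt3]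
  simp

-- zip-chunk sum = count over the first min(|li|,|p|) positions (no modulus)
theorem pv_zip_count (li p : List Int) :
    ((li.zip p).map (fun ab => if ab.1 == ab.2 then (1 : Int) else 0)).sum
      = ((List.range (min li.length p.length)).countP
          (fun i => li.getD i 0 == p.getD i 0) : Nat) := by
  induction li generalizing p with
  | nil => simp
  | cons x xs ih =>
    cases p with
    | nil => simp
    | cons y q =>
      have hmin : min (x :: xs).length (y :: q).length = min xs.length q.length + 1 := by
        simp [Nat.succ_min_succ]
      rw [hmin, List.range_succ_eq_map]
      simp only [List.zip_cons_cons, List.map_cons, List.sum_cons, List.countP_cons,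
        List.countP_map, ih q]
      have hc : (List.range (min xs.length q.length)).countP
            ((fun i => (x :: xs).getD i 0 == (y :: q).getD i 0) ∘ (· + 1))
          = (List.range (min xs.length q.length)).countP
            (fun i => xs.getD i 0 == q.getD i 0) := by
        refine List.countP_congr (fun k _ => ?_)
        simp
      simp only [hc]
      by_cases hxy : x == y <;> simp [hxy] <;> omega

-- peeling one pattern-length chunk off pvCnt
theorem pv_cnt_chunk (p li : List Int) :
    pvCnt p li
      = (List.range (min li.length p.length)).countP (fun i => li.getD i 0 == p.getD i 0)
        + pvCnt p (li.drop p.length) := by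
  set L := p.length with hLdef
  by_cases hn : li.length ≤ L
  · have hdrop : li.drop L = [] := by
      apply List.drop_eq_nil_of_le; omega
    have hmin : min li.length L = li.length := by omega
    rw [hdrop, hmin]
    simp only [pvCnt, List.length_nil, List.range_zero, List.countP_nil, Nat.add_zero]
    refine List.countP_congr (fun k hk => ?_)
    have hkn : k < li.length := List.mem_range.1 hk
    rw [Nat.mod_eq_of_lt (by omega)]
  · have hmin : min li.length L = L := by omega
    have hsplit : li.length = L + (li.length - L) := by omega
    rw [hmin]
    unfold pvCnt
    rw [hsplit, List.range_add, List.countP_append]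
    congr 1
    · refine List.countP_congr (fun k hk => ?_)
      have hkL : k < L := List.mem_range.1 hk
      rw [Nat.mod_eq_of_lt hkL]
    · rw [List.countP_map, List.length_drop, ← hLdef]
      refine List.countP_congr (fun k _ => ?_)
      simp only [Function.comp_apply]
      have hget : (li.drop L).getD k 0 = li.getD (L + k) 0 := by
        simp [List.getD_eq_getElem?_getD, List.getElem?_drop]
      rw [hget, Nat.add_mod_left]

theorem pv_chunk_eq_cnt_aux (p : List Int) (hL : 0 < p.length) (n : Nat) :
    ∀ li : List Int, li.length ≤ n → pvChunkScore p li = (pvCnt p li : Int) := by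
  induction n with
  | zero =>
    intro li hli
    have : li = [] := List.eq_nil_of_length_eq_zero (by omega)
    subst this
    simp [pvChunkScore, pvCnt]
  | succ n ih =>
    intro li hli
    cases li with
    | nil => simp [pvChunkScore, pvCnt]
    | cons x xs =>
      rw [pvChunkScore, dif_neg (by omega)]
      have hrec : pvChunkScore p ((x :: xs).drop p.length) = (pvCnt p ((x :: xs).drop p.length) : Int) := by
        apply ih
        simp only [List.length_drop, List.length_cons]
        simp only [List.length_cons] at hli
        omega
      rw [hrec, pv_zip_count, pv_cnt_chunk p (x :: xs)]
      push_cast; ring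

-- B's chunked score equals pvCnt
theorem pv_chunk_eq_cnt (p li : List Int) (hL : 0 < p.length) :
    pvChunkScore p li = (pvCnt p li : Int) :=
  pv_chunk_eq_cnt_aux p hL li.length li le_rfl

-- the two answer-building passes agree for fixed scores and threshold
theorem pv_answer_eq (x y z m : Int) :
    (PySem.List.pyRange 0 3 1).foldl
      (fun ans i =>
        if PySem.List.pyGetD [x, y, z] i 0 == m then
          if i == 0 then ans ++ [1]
          else if i == 1 then ans ++ [2]
          else ans ++ [3]
        else ans) []
    = ((PySem.List.enumerate [x, y, z]).filter (fun isc => isc.2 == m)).map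
        (fun isc => isc.1 + 1) := by
  have hr : PySem.List.pyRange 0 3 1 = [0, 1, 2] := by decide
  have he : PySem.List.enumerate [x, y, z] = [(0, x), (1, y), (2, z)] := by
    simp [PySem.List.enumerate_cons]
  have e0 : PySem.List.pyGetD [x, y, z] (0 : Int) 0 = x := rfl
  have e1 : PySem.List.pyGetD [x, y, z] (1 : Int) 0 = y := rfl
  have e2 : PySem.List.pyGetD [x, y, z] (2 : Int) 0 = z := rfl
  rw [hr, he]
  simp only [List.foldl, List.filter, e0, e1, e2]
  obtain h0 | h0 := Bool.eq_false_or_eq_true (x == m) <;>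
    obtain h1 | h1 := Bool.eq_false_or_eq_true (y == m) <;>
      obtain h2 | h2 := Bool.eq_false_or_eq_true (z == m) <;>
        simp [h0, h1, h2]

-- zip truncates at the shorter list, so pre-truncating at the pattern length is the identity
theorem pv_zip_take (xs p : List Int) : (xs.take p.length).zip p = xs.zip p := by
  induction xs generalizing p with
  | nil => simp
  | cons x t ih =>
    cases p with
    | nil => simp
    | cons y q => simp [List.zip_cons_cons, ih q]

-- B's index loop is the chunk recursion on the remaining suffix
theorem pv_loop_eq_chunk_aux (p li : List Int) (hL : 0 < p.length) (n : Nat) :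
    ∀ j : Nat, li.length - j ≤ n → pvScoreLoop p li j = pvChunkScore p (li.drop j) := by
  induction n with
  | zero =>
    intro j hj
    have hge : li.length ≤ j := by omega
    rw [pvScoreLoop, dif_neg (by omega), List.drop_eq_nil_of_le hge]
    simp [pvChunkScore]
  | succ n ih =>
    intro j hj
    by_cases h : j < li.length
    · rw [pvScoreLoop, dif_pos h, dif_neg (by omega),
         ih (j + p.length) (by omega)]
      have hslice : PySem.List.slice li (some (j : Int)) (some ((j : Int) + (p.length : Int)))
          = (li.drop j).take p.length := PySem.List.slice_natCast_add li j p.length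
      have hzip : ((li.drop j).take p.length).zip p = (li.drop j).zip p :=
        pv_zip_take (li.drop j) p
      obtain ⟨y, ys, hd⟩ : ∃ y ys, li.drop j = y :: ys := by
        cases hdrop : li.drop j with
        | nil => exact absurd (List.drop_eq_nil_iff.1 hdrop) (by omega)
        | cons y ys => exact ⟨y, ys, rfl⟩
      rw [hslice, hzip, hd, pvChunkScore, dif_neg (by omega), ← hd, List.drop_drop]
    · rw [pvScoreLoop, dif_neg h, List.drop_eq_nil_of_le (by omega)]
      simp [pvChunkScore]

theorem pv_loop_eq_chunk (p li : List Int) (hL : 0 < p.length) :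
    pvScoreLoop p li 0 = pvChunkScore p li := by
  have := pv_loop_eq_chunk_aux p li hL li.length 0 (by omega)
  simpa using this

-- ===== VERDICT =====
theorem solution_spec : Claim_equal_solution := by
  intro li _
  show solution li = solution_alt li
  unfold solution solution_alt
  simp only [List.map]
  rw [pv_scores_eq li,
      pv_loop_eq_chunk [1,2,3,4,5] li (by decide),
      pv_loop_eq_chunk [2,1,2,3,2,4,2,5] li (by decide),
      pv_loop_eq_chunk [3,3,1,1,2,2,4,4,5,5] li (by decide),
      pv_chunk_eq_cnt [1,2,3,4,5] li (by decide),
      pv_chunk_eq_cnt [2,1,2,3,2,4,2,5] li (by decide),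
      pv_chunk_eq_cnt [3,3,1,1,2,2,4,4,5,5] li (by decide)]
  exact pv_answer_eq _ _ _ _
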